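-- pv_equiv track=rewrite | github.com/Vulmatch/Vulmatch | extract_sig/extract_insn_from_bin_lib.py | find_affliate_block
-- ===== SOURCE A (Python) =====
-- def find_affliate_block(each_map,block_addrs):
--  splitted_blocks={}
--  for insn_addr in each_map:
--
--   for block in block_addrs:
--     if insn_addr in block_addrs[block]:
--      if block not in splitted_blocks:
--       splitted_blocks[block]=(insn_addr,[each_map[insn_addr]])
--      else:
--       splitted_blocks[block][1].append(each_map[insn_addr])
--      break
--
--  return splitted_blocks
-- ===== SOURCE B (Python) =====
-- def find_affliate_block(each_map, block_addrs):
--     # Invert block_addrs once into an index addr -> first owning block,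
--     # then group each_map's values in a single pass (no inner scan per insn).
--     owner = {}
--     for block, addrs in block_addrs.items():
--         for a in addrs:
--             owner.setdefault(a, block)
--     splitted_blocks = {}
--     for insn_addr, val in each_map.items():
--         block = owner.get(insn_addr)
--         if block is None:
--             continue
--         prev = splitted_blocks.get(block)
--         if prev is None:
--             splitted_blocks[block] = (insn_addr, [val])
--         else:
--             splitted_blocks[block] = (prev[0], prev[1] + [val])
--     return splitted_blocks
-- ===== Notes on version B (the rewrite author's own statement) =====
-- stated objective: faster
-- what changed: B builds an inverted index addr->first owning block once (setdefault over block_addrs) and then groups each_map in a single pass with dict lookups, instead of A's inner scan over every block's address list for every instruction.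
import Mathlib
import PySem

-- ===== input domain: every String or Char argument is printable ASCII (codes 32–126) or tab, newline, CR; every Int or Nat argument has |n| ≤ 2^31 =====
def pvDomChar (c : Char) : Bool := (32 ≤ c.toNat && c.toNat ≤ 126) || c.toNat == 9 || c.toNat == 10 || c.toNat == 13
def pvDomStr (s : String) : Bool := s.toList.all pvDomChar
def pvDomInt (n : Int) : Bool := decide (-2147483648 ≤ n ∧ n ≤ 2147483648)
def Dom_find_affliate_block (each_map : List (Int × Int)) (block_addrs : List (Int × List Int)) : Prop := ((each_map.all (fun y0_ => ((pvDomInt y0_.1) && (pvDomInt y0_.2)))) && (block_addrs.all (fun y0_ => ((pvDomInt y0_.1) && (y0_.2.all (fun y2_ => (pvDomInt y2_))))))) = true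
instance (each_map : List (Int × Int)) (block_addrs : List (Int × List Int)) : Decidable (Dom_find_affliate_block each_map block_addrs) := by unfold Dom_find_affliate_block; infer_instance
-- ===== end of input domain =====

-- B replaces A's per-instruction scan over all block address lists by an inverted index
-- addr -> first owning block built once, then a single grouping pass over each_map (faster).

-- ===== PORT A =====
-- A's inner 'for block in block_addrs: ... break' loop, recursing over the dict's key list
def pvInnerA (bad : PySem.Dict Int (List Int)) (sp : PySem.Dict Int (Int × List Int))
    (insn v : Int) : List Int → PySem.Dict Int (Int × List Int)
  | [] => sp
  | b :: rest =>
    if insn ∈ bad.getD b [] then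
      if sp.contains b = false then sp.insert b (insn, [v])
      else sp.insert b ((sp.getD b (0, [])).1, (sp.getD b (0, [])).2 ++ [v])
    else pvInnerA bad sp insn v rest

def find_affliate_block (each_map : List (Int × Int)) (block_addrs : List (Int × List Int)) :
    List (Int × Int × List Int) :=
  ((PySem.Dict.ofList each_map).keys.foldl
      (fun sp insn => pvInnerA (PySem.Dict.ofList block_addrs) sp insn
        ((PySem.Dict.ofList each_map).getD insn 0) (PySem.Dict.ofList block_addrs).keys)
      PySem.Dict.empty).items

-- ===== PORT B =====
-- the inverted index: for block, addrs in block_addrs.items(): for a in addrs: owner.setdefault(a, block)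
def pvOwner (bad : PySem.Dict Int (List Int)) : PySem.Dict Int Int :=
  bad.items.foldl (fun ow p => p.2.foldl (fun ow a => ow.setdefault a p.1) ow) PySem.Dict.empty

-- B's loop body for one (insn_addr, val) item of each_map
def pvStepB (ow : PySem.Dict Int Int) (sp : PySem.Dict Int (Int × List Int)) (p : Int × Int) :
    PySem.Dict Int (Int × List Int) :=
  match ow.get? p.1 with
  | none => sp
  | some b =>
    match sp.get? b with
    | none => sp.insert b (p.1, [p.2])
    | some t => sp.insert b (t.1, t.2 ++ [p.2])

def find_affliate_block_alt (each_map : List (Int × Int)) (block_addrs : List (Int × List Int)) :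
    List (Int × Int × List Int) :=
  ((PySem.Dict.ofList each_map).items.foldl
      (pvStepB (pvOwner (PySem.Dict.ofList block_addrs))) PySem.Dict.empty).items

-- ===== PRECONDITION & SPEC =====
def Spec_find_affliate_block (each_map : List (Int × Int)) (block_addrs : List (Int × List Int)) (out : List (Int × Int × List Int)) : Prop := out = find_affliate_block_alt each_map block_addrs
instance (each_map : List (Int × Int)) (block_addrs : List (Int × List Int)) (out : List (Int × Int × List Int)) : Decidable (Spec_find_affliate_block each_map block_addrs out) := by unfold Spec_find_affliate_block; infer_instance

-- ===== CLAIM (what is proved, stated in full; the proofs are below) =====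
def Claim_equal_find_affliate_block : Prop := ∀ (each_map : List (Int × Int)) (block_addrs : List (Int × List Int)), Dom_find_affliate_block each_map block_addrs → Spec_find_affliate_block each_map block_addrs (find_affliate_block each_map block_addrs)

-- ===== LEMMAS AND PROOFS =====

-- proof-only: the first block (in item order) whose address list contains insn
def pvFirstOwn : List (Int × List Int) → Int → Option Int
  | [], _ => none
  | (b, addrs) :: rest, insn => if insn ∈ addrs then some b else pvFirstOwn rest insn

theorem pvInnerA_eq_firstOwn (bad : PySem.Dict Int (List Int))
    (l : List (Int × List Int)) (sp : PySem.Dict Int (Int × List Int)) (insn v : Int)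
    (h : ∀ p ∈ l, bad.getD p.1 [] = p.2) :
    pvInnerA bad sp insn v (l.map (·.1)) =
      match pvFirstOwn l insn with
      | none => sp
      | some b =>
        if sp.contains b = false then sp.insert b (insn, [v])
        else sp.insert b ((sp.getD b (0, [])).1, (sp.getD b (0, [])).2 ++ [v]) := by
  induction l with
  | nil => simp [pvInnerA, pvFirstOwn]
  | cons p rest ih =>
    obtain ⟨b, addrs⟩ := p
    have hb : bad.getD b [] = addrs := h (b, addrs) (by simp)
    by_cases hm : insn ∈ addrs
    · simp [pvInnerA, pvFirstOwn, hb, hm]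
    · simp [pvInnerA, pvFirstOwn, hb, hm, ih (fun q hq => h q (by simp [hq]))]

theorem pvSetdefault_fold_get? (addrs : List Int) (ow : PySem.Dict Int Int) (b x : Int) :
    (addrs.foldl (fun ow a => ow.setdefault a b) ow).get? x =
      match ow.get? x with
      | some v => some v
      | none => if x ∈ addrs then some b else none := by
  induction addrs generalizing ow with
  | nil => cases h : ow.get? x <;> simp [h]
  | cons a rest ih =>
    simp only [List.foldl_cons, ih]
    by_cases hax : x = a
    · subst hax
      rw [PySem.Dict.get?_setdefault_self]
      cases h : ow.get? x <;> simp [h]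
    · rw [PySem.Dict.get?_setdefault_of_ne ow b hax]
      cases h : ow.get? x <;> simp [h, hax]

theorem pvOwner_fold_get? (l : List (Int × List Int)) (ow : PySem.Dict Int Int) (x : Int) :
    (l.foldl (fun ow p => p.2.foldl (fun ow a => ow.setdefault a p.1) ow) ow).get? x =
      match ow.get? x with
      | some v => some v
      | none => pvFirstOwn l x := by
  induction l generalizing ow with
  | nil => cases h : ow.get? x <;> simp [pvFirstOwn, h]
  | cons p rest ih =>
    obtain ⟨b, addrs⟩ := p
    simp only [List.foldl_cons, ih, pvSetdefault_fold_get?]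
    cases h : ow.get? x <;> by_cases hm : x ∈ addrs <;> simp [pvFirstOwn, h, hm]

theorem pvOwner_get? (bad : PySem.Dict Int (List Int)) (x : Int) :
    (pvOwner bad).get? x = pvFirstOwn bad.items x := by
  unfold pvOwner
  rw [pvOwner_fold_get?]
  simp [PySem.Dict.get?_empty]

theorem pvStepA_eq_stepB (bad : PySem.Dict Int (List Int)) (hnd : bad.keys.Nodup)
    (sp : PySem.Dict Int (Int × List Int)) (insn v : Int) :
    pvInnerA bad sp insn v bad.keys = pvStepB (pvOwner bad) sp (insn, v) := by
  have hkeys : bad.keys = bad.items.map (·.1) := rfl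
  rw [hkeys, pvInnerA_eq_firstOwn bad bad.items sp insn v
      (fun p hp => by obtain ⟨k, w⟩ := p; exact PySem.Dict.getD_of_mem_items bad hp hnd [])]
  unfold pvStepB
  rw [pvOwner_get? bad insn]
  cases hf : pvFirstOwn bad.items insn with
  | none => simp
  | some b =>
    cases hg : sp.get? b with
    | none =>
      have hc : sp.contains b = false := by
        rw [PySem.Dict.contains_eq_isSome_get?, hg]; rfl
      simp [hc, hg]
    | some t =>
      have hc : sp.contains b = true := by
        rw [PySem.Dict.contains_eq_isSome_get?, hg]; rfl
      have hd : sp.getD b (0, []) = t := PySem.Dict.getD_of_get?_eq_some sp (0, []) hg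
      simp [hc, hg, hd]

-- ===== VERDICT (by name: the statement is the Claim_ definition above) =====
theorem find_affliate_block_spec : Claim_equal_find_affliate_block := by
  intro each_map block_addrs _
  unfold Spec_find_affliate_block find_affliate_block find_affliate_block_alt
  have hndb : (PySem.Dict.ofList block_addrs).keys.Nodup := PySem.Dict.nodup_keys_ofList block_addrs
  have hnde : (PySem.Dict.ofList each_map).keys.Nodup := PySem.Dict.nodup_keys_ofList each_map
  have hkeys : (PySem.Dict.ofList each_map).keys = (PySem.Dict.ofList each_map).items.map (·.1) := rfl
  rw [hkeys, List.foldl_map]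
  congr 1
  apply PySem.List.foldl_congr_mem
  intro sp p hp
  obtain ⟨k, w⟩ := p
  rw [pvStepA_eq_stepB (PySem.Dict.ofList block_addrs) hndb sp k
      ((PySem.Dict.ofList each_map).getD k 0)]
  rw [show (PySem.Dict.ofList each_map).getD k 0 = w from PySem.Dict.getD_of_mem_items (PySem.Dict.ofList each_map) hp hnde 0]
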